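-- pv_equiv track=rewrite | github.com/maspayn3/coding_practice | python/2873_max_val_of_triplet_I.py | max_triplet_value_bf
-- ===== SOURCE A (Python) =====
-- def max_triplet_value_bf(nums):
--     max_value = 0
--     for i, i_val in enumerate(nums):
--         for j, j_val  in enumerate(nums[i + 1:], start=i+1):
--             for k, k_val in enumerate(nums[j + 1:], start=j+1):
--
--                 value = (i_val - j_val) * k_val
--                 if value > max_value:
--                     max_value = value
--
--     return max_value
-- ===== SOURCE B (Python) =====
-- def max_triplet_value_bf(nums):
--     # One pass: track max/min prefix value and max/min pair difference.
--     # max over (i,j) of (nums[i]-nums[j])*x is max(max_d*x, min_d*x).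
--     if len(nums) < 3:
--         return 0
--     ans = 0
--     max_v = min_v = nums[0]
--     max_d = min_d = nums[0] - nums[1]
--     prev = nums[1]
--     for x in nums[2:]:
--         v1 = max_d * x
--         if v1 > ans:
--             ans = v1
--         v2 = min_d * x
--         if v2 > ans:
--             ans = v2
--         if prev > max_v:
--             max_v = prev
--         if prev < min_v:
--             min_v = prev
--         d1 = max_v - x
--         if d1 > max_d:
--             max_d = d1
--         d2 = min_v - x
--         if d2 < min_d:
--             min_d = d2
--         prev = x
--     return ans
-- ===== Notes on version B (the rewrite author's own statement) =====
-- stated objective: faster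
-- what changed: Replaced the triple nested scan over all i<j<k with a single left-to-right pass maintaining max/min prefix value and max/min pair difference (both extremes are needed because nums may be negative), so each element contributes in O(1).
import Mathlib
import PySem

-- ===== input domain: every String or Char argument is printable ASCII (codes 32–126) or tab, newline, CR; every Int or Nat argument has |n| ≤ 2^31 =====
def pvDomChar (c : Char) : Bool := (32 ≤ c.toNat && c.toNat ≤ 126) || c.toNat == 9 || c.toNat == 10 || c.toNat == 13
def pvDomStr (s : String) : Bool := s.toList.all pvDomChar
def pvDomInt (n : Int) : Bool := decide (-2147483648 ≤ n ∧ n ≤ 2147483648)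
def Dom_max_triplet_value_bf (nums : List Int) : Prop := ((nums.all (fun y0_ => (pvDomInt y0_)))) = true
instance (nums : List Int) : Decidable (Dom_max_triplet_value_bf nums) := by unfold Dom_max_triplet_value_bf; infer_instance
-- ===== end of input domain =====

-- B replaces A's O(n^3) triple scan by one O(n) pass tracking max/min prefix value and max/min pair difference.

-- ===== PORT A =====
def max_triplet_value_bf (nums : List Int) : Int :=
  (PySem.List.enumerate nums).foldl (fun max_value iv =>
    (PySem.List.enumerate (PySem.List.slice nums (some (iv.1 + 1)) none) (iv.1 + 1)).foldl
      (fun max_value jv =>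
        (PySem.List.enumerate (PySem.List.slice nums (some (jv.1 + 1)) none) (jv.1 + 1)).foldl
          (fun max_value kv =>
            let value := (iv.2 - jv.2) * kv.2
            if value > max_value then value else max_value) max_value) max_value) 0

-- ===== PORT B =====
def max_triplet_value_bf_alt (nums : List Int) : Int :=
  if PySem.List.len nums < 3 then 0
  else
    match nums with
    | a :: b :: rest =>
      (rest.foldl (fun (st : Int × Int × Int × Int × Int × Int) x =>
        let ans := st.1
        let max_v := st.2.1
        let min_v := st.2.2.1
        let max_d := st.2.2.2.1
        let min_d := st.2.2.2.2.1
        let prev := st.2.2.2.2.2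
        let ans := if max_d * x > ans then max_d * x else ans
        let ans := if min_d * x > ans then min_d * x else ans
        let max_v := if prev > max_v then prev else max_v
        let min_v := if prev < min_v then prev else min_v
        let max_d := if max_v - x > max_d then max_v - x else max_d
        let min_d := if min_v - x < min_d then min_v - x else min_d
        (ans, max_v, min_v, max_d, min_d, x)) (0, a, a, a - b, a - b, b)).1
    | _ => 0

-- ===== PRECONDITION & SPEC =====
def Spec_max_triplet_value_bf (nums : List Int) (out : Int) : Prop := out = max_triplet_value_bf_alt nums
instance (nums : List Int) (out : Int) : Decidable (Spec_max_triplet_value_bf nums out) := by unfold Spec_max_triplet_value_bf; infer_instance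

-- ===== CLAIM (what is proved, stated in full; the proofs are below) =====
def Claim_equal_max_triplet_value_bf : Prop := ∀ (nums : List Int), Dom_max_triplet_value_bf nums → Spec_max_triplet_value_bf nums (max_triplet_value_bf nums)

-- ===== LEMMAS AND PROOFS =====

-- values (x - y) * z over pairs y before z inside l, for a fixed first element x
def jvals (x : Int) : List Int → List Int
  | [] => []
  | y :: u => u.map (fun z => (x - y) * z) ++ jvals x u

-- all triplet values (l[i] - l[j]) * l[k], i < j < k
def trips : List Int → List Int
  | [] => []
  | x :: t => jvals x t ++ trips t

-- all pair differences l[i] - l[j], i < j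
def pairs : List Int → List Int
  | [] => []
  | y :: u => u.map (fun z => y - z) ++ pairs u

theorem mx_eq_max (m v : Int) : (if v > m then v else m) = max m v := by
  split_ifs <;> omega

theorem mn_eq_min (m v : Int) : (if v < m then v else m) = min m v := by
  split_ifs <;> omega

theorem foldl_max_pull (l : List Int) : ∀ z w : Int, l.foldl max (max z w) = max (l.foldl max z) w := by
  induction l with
  | nil => intro z w; rfl
  | cons c l ih =>
      intro z w
      simp only [List.foldl_cons]
      rw [show max (max z w) c = max (max z c) w by omega, ih]

theorem foldl_min_pull (l : List Int) : ∀ z w : Int, l.foldl min (min z w) = min (l.foldl min z) w := by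
  induction l with
  | nil => intro z w; rfl
  | cons c l ih =>
      intro z w
      simp only [List.foldl_cons]
      rw [show min (min z w) c = min (min z c) w by omega, ih]

theorem foldl_max_comm (l₁ l₂ : List Int) : ∀ z : Int,
    l₁.foldl max (l₂.foldl max z) = l₂.foldl max (l₁.foldl max z) := by
  induction l₁ with
  | nil => intro z; rfl
  | cons c l₁ ih =>
      intro z
      simp only [List.foldl_cons]
      rw [show max (l₂.foldl max z) c = max (l₂.foldl max z) c from rfl]
      rw [← foldl_max_pull l₂ z c, ih]

theorem foldl_min_le_foldl_max (l : List Int) : ∀ a b : Int, a ≤ b → l.foldl min a ≤ l.foldl max b := by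
  induction l with
  | nil => intro a b h; exact h
  | cons c l ih =>
      intro a b h
      exact ih _ _ (by omega)

theorem mapsub_max (l : List Int) : ∀ w x : Int, (l.map (fun v => v - x)).foldl max (w - x) = (l.foldl max w) - x := by
  induction l with
  | nil => intro w x; rfl
  | cons c l ih =>
      intro w x
      simp only [List.map_cons, List.foldl_cons]
      rw [show max (w - x) (c - x) = max w c - x by omega, ih]

theorem mapsub_min (l : List Int) : ∀ w x : Int, (l.map (fun v => v - x)).foldl min (w - x) = (l.foldl min w) - x := by
  induction l with
  | nil => intro w x; rfl
  | cons c l ih =>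
      intro w x
      simp only [List.map_cons, List.foldl_cons]
      rw [show min (w - x) (c - x) = min w c - x by omega, ih]

theorem mapmul_max_nonneg (x : Int) (hx : 0 ≤ x) (l : List Int) : ∀ w : Int,
    (l.map (fun v => v * x)).foldl max (w * x) = (l.foldl max w) * x := by
  induction l with
  | nil => intro w; rfl
  | cons c l ih =>
      intro w
      simp only [List.map_cons, List.foldl_cons]
      rw [show max (w * x) (c * x) = max w c * x by
            rcases le_total w c with h | h
            · rw [max_eq_right (by nlinarith), max_eq_right h]
            · rw [max_eq_left (by nlinarith), max_eq_left h], ih]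

theorem mapmul_max_nonpos (x : Int) (hx : x ≤ 0) (l : List Int) : ∀ w : Int,
    (l.map (fun v => v * x)).foldl max (w * x) = (l.foldl min w) * x := by
  induction l with
  | nil => intro w; rfl
  | cons c l ih =>
      intro w
      simp only [List.map_cons, List.foldl_cons]
      rw [show max (w * x) (c * x) = min w c * x by
            rcases le_total w c with h | h
            · rw [max_eq_left (by nlinarith), min_eq_left h]
            · rw [max_eq_right (by nlinarith), min_eq_right h], ih]

-- ===== A-side: the nested enumerate/slice folds compute a max-fold over trips =====

theorem A_inner (d : Int) (l : List Int) : ∀ (s m : Int),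
    (PySem.List.enumerate l s).foldl (fun mv kv =>
        let value := d * kv.2
        if value > mv then value else mv) m
      = (l.map (fun z => d * z)).foldl max m := by
  induction l with
  | nil => intro s m; simp [PySem.List.enumerate_nil]
  | cons c l ih =>
      intro s m
      rw [PySem.List.enumerate_cons]
      simp only [List.foldl_cons, List.map_cons]
      rw [ih, mx_eq_max]

theorem A_middle (x : Int) (t : List Int) : ∀ (pre : List Int) (m : Int),
    (PySem.List.enumerate t ((pre.length : Int))).foldl (fun mv jv =>
        (PySem.List.enumerate (PySem.List.slice (pre ++ t) (some (jv.1 + 1)) none) (jv.1 + 1)).foldl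
          (fun mv kv =>
            let value := (x - jv.2) * kv.2
            if value > mv then value else mv) mv) m
      = (jvals x t).foldl max m := by
  induction t with
  | nil => intro pre m; simp [PySem.List.enumerate_nil, jvals]
  | cons y u ih =>
      intro pre m
      rw [PySem.List.enumerate_cons]
      simp only [List.foldl_cons]
      have hs : ((pre.length : Int)) + 1 = (((pre ++ [y]).length : Nat) : Int) := by
        simp
      have hsl : PySem.List.slice (pre ++ y :: u) (some ((pre.length : Int) + 1)) none = u := by
        rw [hs, PySem.List.slice_from_natCast]
        rw [show pre ++ y :: u = (pre ++ [y]) ++ u by simp]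
        exact List.drop_left
      rw [hsl, A_inner, hs]
      rw [show pre ++ y :: u = (pre ++ [y]) ++ u by simp]
      rw [ih (pre ++ [y])]
      simp [jvals, List.foldl_append]

theorem A_outer (t : List Int) : ∀ (pre : List Int) (m : Int),
    (PySem.List.enumerate t ((pre.length : Int))).foldl (fun mv iv =>
        (PySem.List.enumerate (PySem.List.slice (pre ++ t) (some (iv.1 + 1)) none) (iv.1 + 1)).foldl
          (fun mv jv =>
            (PySem.List.enumerate (PySem.List.slice (pre ++ t) (some (jv.1 + 1)) none) (jv.1 + 1)).foldl
              (fun mv kv =>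
                let value := (iv.2 - jv.2) * kv.2
                if value > mv then value else mv) mv) mv) m
      = (trips t).foldl max m := by
  induction t with
  | nil => intro pre m; simp [PySem.List.enumerate_nil, trips]
  | cons y u ih =>
      intro pre m
      rw [PySem.List.enumerate_cons]
      simp only [List.foldl_cons]
      have hs : ((pre.length : Int)) + 1 = (((pre ++ [y]).length : Nat) : Int) := by
        simp
      have hsl : PySem.List.slice (pre ++ y :: u) (some ((pre.length : Int) + 1)) none = u := by
        rw [hs, PySem.List.slice_from_natCast]
        rw [show pre ++ y :: u = (pre ++ [y]) ++ u by simp]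
        exact List.drop_left
      rw [hsl, hs]
      rw [show pre ++ y :: u = (pre ++ [y]) ++ u by simp]
      rw [A_middle y u (pre ++ [y]), ih (pre ++ [y])]
      simp [trips, List.foldl_append]

theorem A_eq_trips (nums : List Int) : max_triplet_value_bf nums = (trips nums).foldl max 0 := by
  unfold max_triplet_value_bf
  have h := A_outer nums ([] : List Int) 0
  simpa using h

-- ===== B-side: concat lemmas for pairs / jvals / trips, then the loop invariant =====

theorem jvals_concat_fold (a x : Int) (u : List Int) : ∀ z : Int,
    (jvals a (u ++ [x])).foldl max z
      = (u.map (fun y => (a - y) * x)).foldl max ((jvals a u).foldl max z) := by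
  induction u with
  | nil => intro z; simp [jvals]
  | cons y u ih =>
      intro z
      simp only [List.cons_append, jvals, List.foldl_append, List.map_append, List.map_cons,
        List.map_nil, List.foldl_cons, List.foldl_nil]
      rw [ih, foldl_max_pull (jvals a u)]

theorem trips_concat_fold (x : Int) (p : List Int) : ∀ z : Int,
    (trips (p ++ [x])).foldl max z
      = ((pairs p).map (fun d => d * x)).foldl max ((trips p).foldl max z) := by
  induction p with
  | nil => intro z; simp [trips, pairs, jvals]
  | cons a r ih =>
      intro z
      simp only [List.cons_append, trips, pairs, List.foldl_append, List.map_append]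
      rw [jvals_concat_fold, ih]
      rw [show (r.map (fun y => (a - y) * x)) = (r.map (fun z => a - z)).map (fun d => d * x) by
            rw [List.map_map]; rfl]
      rw [foldl_max_comm (trips r)]

theorem pairs_concat_fold (x : Int) (p : List Int) : ∀ z : Int,
    (pairs (p ++ [x])).foldl max z
      = (p.map (fun v => v - x)).foldl max ((pairs p).foldl max z) := by
  induction p with
  | nil => intro z; simp [pairs]
  | cons a r ih =>
      intro z
      simp only [List.cons_append, pairs, List.foldl_append, List.map_append, List.map_cons,
        List.foldl_cons]
      rw [ih]
      simp only [List.map_nil, List.foldl_nil]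
      rw [foldl_max_pull (pairs r)]

theorem pairs_concat_fold_min (x : Int) (p : List Int) : ∀ z : Int,
    (pairs (p ++ [x])).foldl min z
      = (p.map (fun v => v - x)).foldl min ((pairs p).foldl min z) := by
  induction p with
  | nil => intro z; simp [pairs]
  | cons a r ih =>
      intro z
      simp only [List.cons_append, pairs, List.foldl_append, List.map_append, List.map_cons,
        List.foldl_cons]
      rw [ih]
      simp only [List.map_nil, List.foldl_nil]
      rw [foldl_min_pull (pairs r)]

-- B's step function, named for the proofs
def stepB (st : Int × Int × Int × Int × Int × Int) (x : Int) : Int × Int × Int × Int × Int × Int :=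
  let ans := st.1
  let max_v := st.2.1
  let min_v := st.2.2.1
  let max_d := st.2.2.2.1
  let min_d := st.2.2.2.2.1
  let prev := st.2.2.2.2.2
  let ans := if max_d * x > ans then max_d * x else ans
  let ans := if min_d * x > ans then min_d * x else ans
  let max_v := if prev > max_v then prev else max_v
  let min_v := if prev < min_v then prev else min_v
  let max_d := if max_v - x > max_d then max_v - x else max_d
  let min_d := if min_v - x < min_d then min_v - x else min_d
  (ans, max_v, min_v, max_d, min_d, x)

-- the loop state B maintains after having consumed the prefix a :: b :: q
def invSt (a b : Int) (q : List Int) : Int × Int × Int × Int × Int × Int :=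
  ((trips (a :: b :: q)).foldl max 0,
   ((b :: q).dropLast).foldl max a,
   ((b :: q).dropLast).foldl min a,
   (q.map (fun z => a - z) ++ pairs (b :: q)).foldl max (a - b),
   (q.map (fun z => a - z) ++ pairs (b :: q)).foldl min (a - b),
   (b :: q).getLast (by simp))

theorem fold_dropLast_getLast_max (l : List Int) (h : l ≠ []) (z : Int) :
    max ((l.dropLast).foldl max z) (l.getLast h) = l.foldl max z := by
  conv_rhs => rw [← List.dropLast_append_getLast h]
  rw [List.foldl_append]
  rfl

theorem fold_dropLast_getLast_min (l : List Int) (h : l ≠ []) (z : Int) :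
    min ((l.dropLast).foldl min z) (l.getLast h) = l.foldl min z := by
  conv_rhs => rw [← List.dropLast_append_getLast h]
  rw [List.foldl_append]
  rfl

theorem T4max (a b x : Int) (q : List Int) :
    ((q ++ [x]).map (fun z => a - z) ++ pairs ((b :: q) ++ [x])).foldl max (a - b)
      = max ((q.map (fun z => a - z) ++ pairs (b :: q)).foldl max (a - b))
            (((b :: q).foldl max a) - x) := by
  rw [List.map_append, List.foldl_append, List.foldl_append]
  simp only [List.map_cons, List.map_nil, List.foldl_cons, List.foldl_nil]
  rw [pairs_concat_fold, foldl_max_pull, max_comm _ (a - x), foldl_max_pull, mapsub_max,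
    List.foldl_append, max_comm]
  simp [List.foldl_cons]

theorem T4min (a b x : Int) (q : List Int) :
    ((q ++ [x]).map (fun z => a - z) ++ pairs ((b :: q) ++ [x])).foldl min (a - b)
      = min ((q.map (fun z => a - z) ++ pairs (b :: q)).foldl min (a - b))
            (((b :: q).foldl min a) - x) := by
  rw [List.map_append, List.foldl_append, List.foldl_append]
  simp only [List.map_cons, List.map_nil, List.foldl_cons, List.foldl_nil]
  rw [pairs_concat_fold_min, foldl_min_pull, min_comm _ (a - x), foldl_min_pull, mapsub_min,
    List.foldl_append, min_comm]
  simp [List.foldl_cons]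

theorem T1ans (a b x : Int) (q : List Int) :
    (trips ((a :: b :: q) ++ [x])).foldl max 0
      = max (max ((trips (a :: b :: q)).foldl max 0)
               (((q.map (fun z => a - z) ++ pairs (b :: q)).foldl max (a - b)) * x))
            (((q.map (fun z => a - z) ++ pairs (b :: q)).foldl min (a - b)) * x) := by
  rw [trips_concat_fold]
  have hp : pairs (a :: b :: q) = (a - b) :: (q.map (fun z => a - z) ++ pairs (b :: q)) := by
    simp [pairs]
  rw [hp]
  simp only [List.map_cons, List.foldl_cons]
  rw [max_comm _ ((a - b) * x), foldl_max_pull]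
  have hmm : (q.map (fun z => a - z) ++ pairs (b :: q)).foldl min (a - b)
      ≤ (q.map (fun z => a - z) ++ pairs (b :: q)).foldl max (a - b) :=
    foldl_min_le_foldl_max _ _ _ le_rfl
  rcases le_total 0 x with hx | hx
  · rw [mapmul_max_nonneg x hx]
    have h2 : (q.map (fun z => a - z) ++ pairs (b :: q)).foldl min (a - b) * x
        ≤ (q.map (fun z => a - z) ++ pairs (b :: q)).foldl max (a - b) * x :=
      mul_le_mul_of_nonneg_right hmm hx
    omega
  · rw [mapmul_max_nonpos x hx]
    have h2 : (q.map (fun z => a - z) ++ pairs (b :: q)).foldl max (a - b) * x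
        ≤ (q.map (fun z => a - z) ++ pairs (b :: q)).foldl min (a - b) * x :=
      mul_le_mul_of_nonpos_right hmm hx
    omega

theorem stepB_invSt (a b x : Int) (q : List Int) :
    stepB (invSt a b q) x = invSt a b (q ++ [x]) := by
  simp only [stepB, invSt, mx_eq_max, mn_eq_min]
  refine Prod.ext ?_ (Prod.ext ?_ (Prod.ext ?_ (Prod.ext ?_ (Prod.ext ?_ ?_))))
  · show max (max ((trips (a :: b :: q)).foldl max 0)
          ((q.map (fun z => a - z) ++ pairs (b :: q)).foldl max (a - b) * x))
        ((q.map (fun z => a - z) ++ pairs (b :: q)).foldl min (a - b) * x)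
      = (trips ((a :: b :: q) ++ [x])).foldl max 0
    exact (T1ans a b x q).symm
  · show max (((b :: q).dropLast).foldl max a) ((b :: q).getLast (by simp))
      = ((((b :: q) ++ [x]).dropLast).foldl max a)
    rw [List.dropLast_concat]
    exact fold_dropLast_getLast_max (b :: q) (by simp) a
  · show min (((b :: q).dropLast).foldl min a) ((b :: q).getLast (by simp))
      = ((((b :: q) ++ [x]).dropLast).foldl min a)
    rw [List.dropLast_concat]
    exact fold_dropLast_getLast_min (b :: q) (by simp) a
  · show max ((q.map (fun z => a - z) ++ pairs (b :: q)).foldl max (a - b))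
        (max (((b :: q).dropLast).foldl max a) ((b :: q).getLast (by simp)) - x)
      = ((q ++ [x]).map (fun z => a - z) ++ pairs ((b :: q) ++ [x])).foldl max (a - b)
    rw [T4max, fold_dropLast_getLast_max (b :: q) (by simp) a]
  · show min ((q.map (fun z => a - z) ++ pairs (b :: q)).foldl min (a - b))
        (min (((b :: q).dropLast).foldl min a) ((b :: q).getLast (by simp)) - x)
      = ((q ++ [x]).map (fun z => a - z) ++ pairs ((b :: q) ++ [x])).foldl min (a - b)
    rw [T4min, fold_dropLast_getLast_min (b :: q) (by simp) a]
  · show x = ((b :: q) ++ [x]).getLast (by simp)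
    exact List.getLast_concat.symm

theorem B_loop (t : List Int) : ∀ (a b : Int) (q : List Int),
    (t.foldl stepB (invSt a b q)).1 = (trips ((a :: b :: q) ++ t)).foldl max 0 := by
  induction t with
  | nil => intro a b q; simp [invSt]
  | cons x t ih =>
      intro a b q
      rw [List.foldl_cons, stepB_invSt, ih a b (q ++ [x])]
      congr 2
      simp

theorem B_eq_trips (nums : List Int) : max_triplet_value_bf_alt nums = (trips nums).foldl max 0 := by
  match nums with
  | [] => simp [max_triplet_value_bf_alt, trips, PySem.List.len_eq]
  | [a] => simp [max_triplet_value_bf_alt, trips, jvals, PySem.List.len_eq]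
  | [a, b] => simp [max_triplet_value_bf_alt, trips, jvals, PySem.List.len_eq]
  | a :: b :: c :: rest =>
      have hlen : ¬ (PySem.List.len (a :: b :: c :: rest) < 3) := by
        simp [PySem.List.len_eq]; omega
      unfold max_triplet_value_bf_alt
      rw [if_neg hlen]
      have h := B_loop (c :: rest) a b []
      simp only [invSt] at h
      simp only [trips, jvals, pairs, List.map_nil, List.foldl_nil, List.append_nil,
        List.dropLast_singleton, List.getLast_singleton] at h
      exact h

-- ===== VERDICT (by name: the statement is the Claim_ definition above) =====
theorem max_triplet_value_bf_spec : Claim_equal_max_triplet_value_bf := by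
  intro nums _
  unfold Spec_max_triplet_value_bf
  rw [A_eq_trips, B_eq_trips]
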